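-- pv_equiv track=rewrite | github.com/Sorento465/Sultanov-ib-11 | pythonProject1500/1507.py | find_mountain
-- ===== SOURCE A (Python) =====
-- def find_mountain(heightsMap):
--     t = []
--     for i in heightsMap:
--         t.append(max(i))
--     s = max(t)
--     for i in range(len(heightsMap)):
--         if s in heightsMap[i]:
--             row = i
--     for i in heightsMap:
--         for j in range(len(i)):
--             if s == i[j]:
--                 col = j
--     return (row, col)
-- ===== SOURCE B (Python) =====
-- def find_mountain(heightsMap):
--     s = max(max(row) for row in heightsMap)
--     for i, row in reversed(list(enumerate(heightsMap))):
--         for j in range(len(row) - 1, -1, -1):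
--             if row[j] == s:
--                 return (i, j)
-- ===== Notes on version B (the rewrite author's own statement) =====
-- stated objective: alternative
-- what changed: Replaces A's three full scans (build a row-max table, re-scan all rows for the last row containing the max, re-scan all cells for the last column) by computing the max as max of row maxes and then a single early-exit reverse row-major scan that returns at the first cell equal to it.
import Mathlib
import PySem

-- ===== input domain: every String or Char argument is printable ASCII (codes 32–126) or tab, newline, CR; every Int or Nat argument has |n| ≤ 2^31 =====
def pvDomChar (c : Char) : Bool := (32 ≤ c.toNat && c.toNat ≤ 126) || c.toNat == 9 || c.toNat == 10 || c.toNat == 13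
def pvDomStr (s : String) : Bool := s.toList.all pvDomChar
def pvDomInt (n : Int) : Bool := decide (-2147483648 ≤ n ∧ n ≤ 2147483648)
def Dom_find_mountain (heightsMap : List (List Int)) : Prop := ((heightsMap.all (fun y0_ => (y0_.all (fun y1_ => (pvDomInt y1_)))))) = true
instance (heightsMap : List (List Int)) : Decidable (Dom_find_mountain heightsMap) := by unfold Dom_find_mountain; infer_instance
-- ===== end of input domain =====

-- B replaces A's three full scans by one max-of-row-maxes plus a single early-exit
-- reverse row-major scan (alternative decomposition, same asymptotic cost).

-- ===== PORT A =====
-- literal transliteration of A: builds the row-max table t, s = max(t),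
-- `row`/`col` are the possibly-unassigned loop variables, modelled as Option (none = unassigned;
-- Pre_ guarantees they get assigned, matching Python where an unassigned `row` would raise).
def find_mountain (heightsMap : List (List Int)) : Int × Int :=
  let t := heightsMap.foldl (fun acc i => acc ++ [(PySem.List.max? i (fun y => y)).getD 0]) []
  let s := (PySem.List.max? t (fun y => y)).getD 0
  let row := (PySem.List.pyRange 0 (heightsMap.length : Int) 1).foldl
      (fun r i => if s ∈ PySem.List.pyGetD heightsMap i [] then some i else r) (none : Option Int)
  let col := heightsMap.foldl (fun c i =>
      (PySem.List.pyRange 0 (i.length : Int) 1).foldl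
        (fun c j => if s = PySem.List.pyGetD i j 0 then some j else c) c) (none : Option Int)
  (row.getD 0, col.getD 0)

-- ===== PORT B =====
-- Source B's inner loop `for j in range(len(row)-1, -1, -1): if row[j] == s: return j`
-- is the last index of s in row; pvLastIdx transcribes that back-to-front scan structurally.
def pvLastIdx (s : Int) : List Int → Option Nat
  | [] => none
  | x :: xs =>
    match pvLastIdx s xs with
    | some j => some (j + 1)
    | none => if x = s then some 0 else none

-- Source B's outer loop over reversed(list(enumerate(heightsMap))) with early return.
def pvScanRows (s : Int) : List (Int × List Int) → Int × Int
  | [] => (0, 0)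
  | (i, row) :: rest =>
    match pvLastIdx s row with
    | some j => (i, (j : Int))
    | none => pvScanRows s rest

def find_mountain_alt (heightsMap : List (List Int)) : Int × Int :=
  let s := (PySem.List.max? (heightsMap.map (fun row => (PySem.List.max? row (fun y => y)).getD 0)) (fun y => y)).getD 0
  pvScanRows s (PySem.List.enumerate heightsMap 0).reverse

-- ===== PRECONDITION & SPEC =====
-- Pre_ excludes exactly the inputs on which Python A raises: max([]) raises ValueError on
-- an empty grid or any empty row (and then `row`/`col` would be unassigned). B raises there too.
def Pre_find_mountain (heightsMap : List (List Int)) : Prop :=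
  heightsMap ≠ [] ∧ ∀ r ∈ heightsMap, r ≠ []
instance (heightsMap : List (List Int)) : Decidable (Pre_find_mountain heightsMap) := by
  unfold Pre_find_mountain; infer_instance
def pvWitness_find_mountain : List (List Int) := [[1, 2], [3]]

def Spec_find_mountain (heightsMap : List (List Int)) (out : Int × Int) : Prop := out = find_mountain_alt heightsMap
instance (heightsMap : List (List Int)) (out : Int × Int) : Decidable (Spec_find_mountain heightsMap out) := by unfold Spec_find_mountain; infer_instance

-- ===== CLAIM (what is proved, stated in full; the proofs are below) =====
def Claim_equal_find_mountain : Prop := ∀ (heightsMap : List (List Int)), Dom_find_mountain heightsMap → Pre_find_mountain heightsMap → Spec_find_mountain heightsMap (find_mountain heightsMap)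

-- ===== LEMMAS AND PROOFS =====

-- "keep the last match" fold = first match of the reversed list.
theorem pv_foldl_if_last {α β : Type} (p : α → Prop) [DecidablePred p] (f : α → β)
    (l : List α) (c : Option β) :
    l.foldl (fun c x => if p x then some (f x) else c) c
      = (l.reverse.findSome? (fun x => if p x then some (f x) else none)).or c := by
  induction l generalizing c with
  | nil => simp
  | cons x xs ih =>
    simp only [List.foldl_cons, ih, List.reverse_cons, List.findSome?_append]
    cases h : xs.reverse.findSome? (fun x => if p x then some (f x) else none) <;>
      simp [List.findSome?, Option.or] <;> split <;> simp

-- "keep the last some" fold = first some of the reversed list.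
theorem pv_foldl_or_last {α β : Type} (g : α → Option β) (l : List α) (c : Option β) :
    l.foldl (fun c x => (g x).or c) c = (l.reverse.findSome? g).or c := by
  induction l generalizing c with
  | nil => simp
  | cons x xs ih =>
    simp only [List.foldl_cons, ih, List.reverse_cons, List.findSome?_append]
    cases h : xs.reverse.findSome? g <;> cases h2 : g x <;> simp [List.findSome?, Option.or, h2]

theorem pv_lastIdx_none (s : Int) (r : List Int) (h : s ∉ r) : pvLastIdx s r = none := by
  induction r with
  | nil => rfl
  | cons x xs ih =>
    simp only [List.mem_cons, not_or] at h
    simp [pvLastIdx, ih h.2, Ne.symm h.1]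

theorem pv_lastIdx_some (s : Int) (r : List Int) (h : s ∈ r) : ∃ j, pvLastIdx s r = some j := by
  induction r with
  | nil => simp at h
  | cons x xs ih =>
    by_cases hx : s ∈ xs
    · obtain ⟨j, hj⟩ := ih hx
      exact ⟨j + 1, by simp [pvLastIdx, hj]⟩
    · have : x = s := by rcases List.mem_cons.1 h with h' | h' <;> simp_all
      exact ⟨0, by simp [pvLastIdx, pv_lastIdx_none s xs hx, this]⟩

-- the reversed-enumerate "last hit" search computes pvLastIdx (shifted by the start index).
theorem pv_lastIdx_enum (s : Int) (r : List Int) (s0 : Int) :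
    (PySem.List.enumerate r s0).reverse.findSome?
        (fun p => if s = p.2 then some p.1 else none)
      = (pvLastIdx s r).map (fun j => s0 + (j : Int)) := by
  induction r generalizing s0 with
  | nil => simp [PySem.List.enumerate_nil, pvLastIdx]
  | cons x xs ih =>
    simp only [PySem.List.enumerate_cons, List.reverse_cons, List.findSome?_append, ih]
    cases h : pvLastIdx s xs with
    | some j => simp [pvLastIdx, h]; push_cast; ring
    | none =>
      by_cases hx : s = x
      · subst hx; simp [pvLastIdx, h, List.findSome?]
      · simp [pvLastIdx, h, List.findSome?, hx, Ne.symm hx]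

theorem pv_scan (s : Int) (L : List (Int × List Int)) (h : ∃ p ∈ L, s ∈ p.2) :
    pvScanRows s L =
      ((L.findSome? (fun p => if s ∈ p.2 then some p.1 else none)).getD 0,
       ((L.map Prod.snd).findSome? (fun r => (pvLastIdx s r).map (fun j => (j : Int)))).getD 0) := by
  induction L with
  | nil => simp at h
  | cons p L ih =>
    by_cases hp : s ∈ p.2
    · obtain ⟨j, hj⟩ := pv_lastIdx_some s p.2 hp
      cases p with
      | mk i row => simp_all [pvScanRows, List.findSome?]
    · have hnone := pv_lastIdx_none s p.2 hp
      have h' : ∃ q ∈ L, s ∈ q.2 := by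
        rcases h with ⟨q, hq, hs⟩
        rcases List.mem_cons.1 hq with rfl | hq' <;> [exact absurd hs hp; exact ⟨q, hq', hs⟩]
      cases p with
      | mk i row => simp_all [pvScanRows, List.findSome?]

-- under Pre_, the global max s really occurs in some row.
theorem pv_s_mem (hm : List (List Int)) (hne : hm ≠ []) (hrows : ∀ r ∈ hm, r ≠ []) :
    ∃ r ∈ hm,
      (PySem.List.max? (hm.map (fun i => (PySem.List.max? i (fun y => y)).getD 0)) (fun y => y)).getD 0 ∈ r := by
  set f : List Int → Int := fun i => (PySem.List.max? i (fun y => y)).getD 0 with hf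
  cases hmax : PySem.List.max? (hm.map f) (fun y => y) with
  | none =>
    exact absurd (List.map_eq_nil_iff.1 ((PySem.List.max?_eq_none_iff _ _).1 hmax)) hne
  | some m =>
    have hmem : m ∈ hm.map f := PySem.List.max?_mem hmax
    obtain ⟨r, hr, hfr⟩ := List.mem_map.1 hmem
    refine ⟨r, hr, ?_⟩
    cases hmr : PySem.List.max? r (fun y => y) with
    | none => exact absurd ((PySem.List.max?_eq_none_iff _ _).1 hmr) (hrows r hr)
    | some m' =>
      have : m = m' := by rw [← hfr, hf]; simp [hmr]
      simp [hmax, this, PySem.List.max?_mem hmr]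

-- A's two "keep the last match" folds jointly compute B's reverse scan.
theorem pv_main (hm : List (List Int)) (s : Int) (hEx : ∃ r ∈ hm, s ∈ r) :
    ((((PySem.List.pyRange 0 (hm.length : Int) 1).foldl
          (fun r i => if s ∈ PySem.List.pyGetD hm i [] then some i else r) (none : Option Int)).getD 0),
     ((hm.foldl (fun c i =>
          (PySem.List.pyRange 0 (i.length : Int) 1).foldl
            (fun c j => if s = PySem.List.pyGetD i j 0 then some j else c) c) (none : Option Int)).getD 0))
      = pvScanRows s (PySem.List.enumerate hm 0).reverse := by
  have henum : PySem.List.enumerate hm 0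
      = (PySem.List.pyRange 0 (hm.length : Int) 1).map (fun j => (j, PySem.List.pyGetD hm j [])) := by
    simpa using PySem.List.enumerate_eq_map_pyRange hm []
  have hExL : ∃ p ∈ (PySem.List.enumerate hm 0).reverse, s ∈ p.2 := by
    rcases hEx with ⟨r, hr, hsr⟩
    obtain ⟨k, hk, hkr⟩ := List.mem_iff_getElem.1 hr
    exact ⟨((k : Int), r), List.mem_reverse.2 ((PySem.List.mem_enumerate_iff hm 0 _).2
      ⟨k, hk, by simp [hkr]⟩), hsr⟩
  have hrowfold :
      (PySem.List.pyRange 0 (hm.length : Int) 1).foldl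
          (fun r i => if s ∈ PySem.List.pyGetD hm i [] then some i else r) (none : Option Int)
        = ((PySem.List.enumerate hm 0).reverse.findSome?
              (fun p => if s ∈ p.2 then some p.1 else none)).or none := by
    have h1 := pv_foldl_if_last (fun p : Int × List Int => s ∈ p.2) Prod.fst
      ((PySem.List.pyRange 0 (hm.length : Int) 1).map (fun j => (j, PySem.List.pyGetD hm j [])))
      (none : Option Int)
    rw [List.foldl_map, ← henum] at h1
    simpa using h1
  have hinner : ∀ (r : List Int) (c : Option Int),
      (PySem.List.pyRange 0 (r.length : Int) 1).foldl
          (fun c j => if s = PySem.List.pyGetD r j 0 then some j else c) c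
        = ((pvLastIdx s r).map (fun j => (j : Int))).or c := by
    intro r c
    have he : PySem.List.enumerate r 0
        = (PySem.List.pyRange 0 (r.length : Int) 1).map (fun j => (j, PySem.List.pyGetD r j 0)) := by
      simpa using PySem.List.enumerate_eq_map_pyRange r 0
    have h1 := pv_foldl_if_last (fun p : Int × Int => s = p.2) Prod.fst
      ((PySem.List.pyRange 0 (r.length : Int) 1).map (fun j => (j, PySem.List.pyGetD r j 0))) c
    rw [List.foldl_map, ← he, pv_lastIdx_enum s r 0] at h1
    simpa using h1
  have hcolfun : (fun (c : Option Int) (i : List Int) =>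
        (PySem.List.pyRange 0 (i.length : Int) 1).foldl
          (fun c j => if s = PySem.List.pyGetD i j 0 then some j else c) c)
      = fun c i => ((pvLastIdx s i).map (fun j => (j : Int))).or c := by
    funext c i; exact hinner i c
  have hsnd : (PySem.List.enumerate hm 0).reverse.map Prod.snd = hm.reverse := by
    rw [List.map_reverse, PySem.List.map_snd_enumerate]
  rw [pv_scan s _ hExL, hrowfold, hcolfun,
    pv_foldl_or_last (fun r => (pvLastIdx s r).map (fun j => (j : Int))) hm (none : Option Int),
    hsnd]
  simp

-- ===== VERDICT (by name: the statement is the Claim_ definition above) =====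
theorem find_mountain_spec : Claim_equal_find_mountain := by
  intro hm _ hpre
  obtain ⟨hne, hrows⟩ := hpre
  unfold Spec_find_mountain find_mountain find_mountain_alt
  dsimp only
  rw [PySem.List.foldl_append_singleton_eq_map, List.nil_append]
  exact pv_main hm _ (pv_s_mem hm hne hrows)
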